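-- pv_equiv track=rewrite | github.com/Abjad/abjad | trunk/abjad/tools/seqtools/is_restricted_growth_function.py | is_restricted_growth_function
-- ===== SOURCE A (Python) =====
-- def is_restricted_growth_function(l):
--    '''.. versionadded:: 1.2.2
--
--    True when `expr` is a sequence and `expr` meets the criteria for a restricted
--    growth function::
--
--       abjad> seqtools.is_restricted_growth_function([1, 1, 1, 1])
--       True
--
--    ::
--
--
--       abjad> seqtools.is_restricted_growth_function([1, 1, 1, 2])
--       True
--
--    ::
--
--       abjad> seqtools.is_restricted_growth_function([1, 1, 2, 1])
--       True
--
--    ::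
--
--       abjad> seqtools.is_restricted_growth_function([1, 1, 2, 2])
--       True
--
--    Otherwise false::
--
--       abjad> seqtools.is_restricted_growth_function([1, 1, 1, 3])
--       False
--
--    ::
--
--       abjad> seqtools.is_restricted_growth_function(17)
--       False
--
--    A restricted growth function is a sequence ``l`` such that ``l[0] == 1``
--    and such that ``l[i] <= max(l[:i]) + 1`` for ``1 <= i <= len(l)``.
--    '''
--
--    try:
--       for i, n in enumerate(l):
--          if i == 0:
--             if not n == 1:
--                return False
--          else:
--             if not n <= max(l[:i]) + 1:
--                return False
--       return True
--    except TypeError: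
--       return False
-- ===== SOURCE B (Python) =====
-- def is_restricted_growth_function(l):
--     # Build the running-maximum prefix table in one pass, then check
--     # l[0] == 1 and each later element against the previous prefix max.
--     try:
--         xs = list(l)
--         if not xs:
--             return True
--         prefix = []
--         m = xs[0]
--         for n in xs:
--             m = m if m >= n else n
--             prefix.append(m)
--         return xs[0] == 1 and all(n <= m + 1 for n, m in zip(xs[1:], prefix))
--     except TypeError:
--         return False
-- ===== Notes on version B (the rewrite author's own statement) =====
-- stated objective: alternative
-- what changed: B builds a prefix running-maximum table in one pass and then checks the RGF condition against it with a zip, instead of A's enumerate loop that recomputes max(l[:i]) from scratch at every index with early returns.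
import Mathlib
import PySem

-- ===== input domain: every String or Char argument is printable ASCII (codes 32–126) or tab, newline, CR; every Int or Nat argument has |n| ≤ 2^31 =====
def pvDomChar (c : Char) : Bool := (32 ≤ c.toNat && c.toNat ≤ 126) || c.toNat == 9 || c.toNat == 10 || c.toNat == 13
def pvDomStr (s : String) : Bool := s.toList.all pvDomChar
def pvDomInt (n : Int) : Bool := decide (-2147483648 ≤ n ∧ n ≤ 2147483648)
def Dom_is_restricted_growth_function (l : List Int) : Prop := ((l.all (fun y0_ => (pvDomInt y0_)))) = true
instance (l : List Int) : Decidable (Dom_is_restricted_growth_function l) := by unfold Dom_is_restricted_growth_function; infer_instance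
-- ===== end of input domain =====

-- B checks the RGF condition against a prefix running-maximum table built in one pass, instead of recomputing max(l[:i]) at every index as A does (a different decomposition; not measured faster).
-- On List Int no TypeError can occur, so both functions are total here.

-- ===== PORT A =====
-- the enumerate loop with early returns; each step recomputes max(l[:i])
def arf_go (l : List Int) : List (Int × Int) → Bool
  | [] => true
  | (i, n) :: rest =>
    if i == 0 then
      (if n == 1 then arf_go l rest else false)
    else
      match PySem.List.max? (PySem.List.slice l none (some i)) (fun y => y) with
      | some m => if n ≤ m + 1 then arf_go l rest else false
      | none => false   -- unreachable: i ≥ 1, so l[:i] is nonempty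

def is_restricted_growth_function (l : List Int) : Bool :=
  arf_go l (PySem.List.enumerate l)

-- ===== PORT B =====
-- the prefix running-maximum table (m starts at xs[0], updated per element)
def pmList (m : Int) : List Int → List Int
  | [] => []
  | n :: t => let m' := if m ≥ n then m else n; m' :: pmList m' t

def is_restricted_growth_function_alt (l : List Int) : Bool :=
  match l with
  | [] => true
  | x :: _ =>
    let pref := pmList x l
    (x == 1) && (List.zip l.tail pref).all (fun p => decide (p.1 ≤ p.2 + 1))

-- ===== PRECONDITION & SPEC =====
def Spec_is_restricted_growth_function (l : List Int) (out : Bool) : Prop := out = is_restricted_growth_function_alt l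
instance (l : List Int) (out : Bool) : Decidable (Spec_is_restricted_growth_function l out) := by unfold Spec_is_restricted_growth_function; infer_instance

-- ===== CLAIM (what is proved, stated in full; the proofs are below) =====
def Claim_equal_is_restricted_growth_function : Prop := ∀ (l : List Int), Dom_is_restricted_growth_function l → Spec_is_restricted_growth_function l (is_restricted_growth_function l)

-- ===== LEMMAS AND PROOFS =====

-- common running-max checker both sides reduce to
def chk (m : Int) : List Int → Bool
  | [] => true
  | n :: t => if n ≤ m + 1 then chk (max m n) t else false

lemma arf_go_eq_chk : ∀ (suf pre_t : List Int) (p : Int),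
    arf_go ((p :: pre_t) ++ suf) (PySem.List.enumerate suf ((p :: pre_t).length : Int))
      = chk (pre_t.foldl max p) suf := by
  intro suf
  induction suf with
  | nil => intro pre_t p; simp [PySem.List.enumerate_nil, arf_go, chk]
  | cons n t ih =>
    intro pre_t p
    rw [PySem.List.enumerate_cons, arf_go]
    have hlen : (((p :: pre_t).length : Int) == 0) = false := by
      simp [List.length_cons]
      omega
    rw [hlen]
    have hslice : PySem.List.slice ((p :: pre_t) ++ (n :: t)) none (some ((p :: pre_t).length : Int))
        = p :: pre_t := by
      rw [PySem.List.slice_to_natCast]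
      exact List.take_left
    simp only [Bool.false_eq_true, if_false, hslice, PySem.List.max?_id_cons]
    have hre : (p :: pre_t) ++ (n :: t) = (p :: (pre_t ++ [n])) ++ t := by simp
    have hlen2 : (((p :: pre_t).length : Int) + 1) = ((p :: (pre_t ++ [n])).length : Int) := by
      simp
    simp only [chk]
    by_cases h : n ≤ pre_t.foldl max p + 1
    · rw [if_pos h, if_pos h, hre, hlen2, ih, List.foldl_concat]
    · rw [if_neg h, if_neg h]

lemma chk_eq_zip : ∀ (t : List Int) (m : Int),
    (List.zip t (m :: pmList m t)).all (fun p => decide (p.1 ≤ p.2 + 1)) = chk m t := by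
  intro t
  induction t with
  | nil => intro m; simp [chk]
  | cons n t' ih =>
    intro m
    have hmax : (if m ≥ n then m else n) = max m n := by
      rcases le_total m n with h | h <;> simp [max_def] <;> omega
    simp only [pmList, hmax, List.zip_cons_cons, List.all_cons, chk]
    by_cases h : n ≤ m + 1
    · simp [h, ih]
    · simp [h]

lemma both_eq (l : List Int) :
    is_restricted_growth_function l = is_restricted_growth_function_alt l := by
  cases l with
  | nil =>
    simp [is_restricted_growth_function, is_restricted_growth_function_alt,
      PySem.List.enumerate_nil, arf_go]
  | cons x rest =>
    have hA : is_restricted_growth_function (x :: rest)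
        = ((x == 1) && chk x rest) := by
      unfold is_restricted_growth_function
      rw [PySem.List.enumerate_cons, arf_go]
      simp only [beq_self_eq_true, if_true]
      by_cases h : x = 1
      · subst h
        have := arf_go_eq_chk rest [] 1
        simp at this
        simp [this]
      · simp [h]
    have hB : is_restricted_growth_function_alt (x :: rest)
        = ((x == 1) && chk x rest) := by
      unfold is_restricted_growth_function_alt
      simp only []
      have hpm : pmList x (x :: rest) = x :: pmList x rest := by
        simp [pmList]
      rw [hpm]
      simp only [List.tail_cons]
      rw [chk_eq_zip]
    rw [hA, hB]

-- ===== VERDICT (by name: the statement is the Claim_ definition above) =====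
theorem is_restricted_growth_function_spec : Claim_equal_is_restricted_growth_function := by
  intro l _
  unfold Spec_is_restricted_growth_function
  exact both_eq l
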